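-- pv_equiv track=rewrite | github.com/X-rayLaser/pytorch-handwriting-synthesis-toolkit | handwriting_synthesis/data.py | to_absolute_coordinates
-- ===== SOURCE A (Python) =====
-- def to_absolute_coordinates(offsets):
--     res = []
--     prev_x, prev_y = 0, 0
--
--     for offset in offsets:
--         x_offset, y_offset, eos = offset
--         prev_x += x_offset
--         prev_y += y_offset
--
--         res.append((prev_x, prev_y, eos))
--     return res
-- ===== SOURCE B (Python) =====
-- def _prefix_sums(values):
--     total = 0
--     out = []
--     for v in values:
--         total += v
--         out.append(total)
--     return out
--
--
-- def to_absolute_coordinates(offsets):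
--     if not offsets:
--         return []
--     xs, ys, eoss = zip(*offsets)
--     return list(zip(_prefix_sums(xs), _prefix_sums(ys), eoss))
-- ===== Notes on version B (the rewrite author's own statement) =====
-- stated objective: alternative
-- what changed: Replaces the single fused loop carrying (prev_x, prev_y) with a transpose via zip(*offsets), two independent prefix-sum passes over the x and y columns, and a final zip recombining them with the untouched eos column.
import Mathlib
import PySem

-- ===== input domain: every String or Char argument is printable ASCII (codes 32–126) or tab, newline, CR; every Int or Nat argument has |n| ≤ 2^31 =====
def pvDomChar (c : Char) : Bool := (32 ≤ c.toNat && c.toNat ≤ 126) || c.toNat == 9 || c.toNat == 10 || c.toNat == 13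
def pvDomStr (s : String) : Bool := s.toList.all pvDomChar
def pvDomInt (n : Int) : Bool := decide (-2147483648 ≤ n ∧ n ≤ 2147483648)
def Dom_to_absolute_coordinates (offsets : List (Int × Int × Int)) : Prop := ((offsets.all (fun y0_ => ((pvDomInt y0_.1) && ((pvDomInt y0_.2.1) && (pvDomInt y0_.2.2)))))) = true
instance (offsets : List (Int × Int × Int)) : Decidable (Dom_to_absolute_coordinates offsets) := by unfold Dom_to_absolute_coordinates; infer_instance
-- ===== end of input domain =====

-- B replaces A's fused accumulator loop by a transpose + two independent prefix-sum passes + zip (alternative decomposition, same cost).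


-- ===== PORT A =====
-- literal transliteration of A: one fold carrying (prev_x, prev_y, res)
def to_absolute_coordinates (offsets : List (Int × Int × Int)) : List (Int × Int × Int) :=
  (offsets.foldl
    (fun (st : Int × Int × List (Int × Int × Int)) offset =>
      let prev_x := st.1 + offset.1
      let prev_y := st.2.1 + offset.2.1
      (prev_x, prev_y, st.2.2 ++ [(prev_x, prev_y, offset.2.2)]))
    (0, 0, [])).2.2

-- ===== PORT B =====
-- helper _prefix_sums: a running total appended to an output list
def prefixSums (values : List Int) : List Int :=
  (values.foldl (fun (st : Int × List Int) v => (st.1 + v, st.2 ++ [st.1 + v])) (0, [])).2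

def to_absolute_coordinates_alt (offsets : List (Int × Int × Int)) : List (Int × Int × Int) :=
  match offsets with
  | [] => []
  | _ =>
    let xs := offsets.map (·.1)
    let ys := offsets.map (·.2.1)
    let eoss := offsets.map (·.2.2)
    (prefixSums xs).zip ((prefixSums ys).zip eoss)

-- ===== PRECONDITION & SPEC =====
def Spec_to_absolute_coordinates (offsets : List (Int × Int × Int)) (out : List (Int × Int × Int)) : Prop := out = to_absolute_coordinates_alt offsets
instance (offsets : List (Int × Int × Int)) (out : List (Int × Int × Int)) : Decidable (Spec_to_absolute_coordinates offsets out) := by unfold Spec_to_absolute_coordinates; infer_instance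

-- ===== CLAIM (what is proved, stated in full; the proofs are below) =====
def Claim_equal_to_absolute_coordinates : Prop := ∀ (offsets : List (Int × Int × Int)), Dom_to_absolute_coordinates offsets → Spec_to_absolute_coordinates offsets (to_absolute_coordinates offsets)

-- ===== LEMMAS AND PROOFS =====

-- recursive characterisation of A's accumulation
def absFrom (px py : Int) : List (Int × Int × Int) → List (Int × Int × Int)
  | [] => []
  | o :: t => (px + o.1, py + o.2.1, o.2.2) :: absFrom (px + o.1) (py + o.2.1) t

theorem foldA_eq (l : List (Int × Int × Int)) : ∀ (px py : Int) (res : List (Int × Int × Int)),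
    (l.foldl
      (fun (st : Int × Int × List (Int × Int × Int)) offset =>
        let prev_x := st.1 + offset.1
        let prev_y := st.2.1 + offset.2.1
        (prev_x, prev_y, st.2.2 ++ [(prev_x, prev_y, offset.2.2)]))
      (px, py, res)).2.2 = res ++ absFrom px py l := by
  induction l with
  | nil => intro px py res; simp [absFrom]
  | cons o t ih =>
    intro px py res
    simp only [List.foldl, absFrom]
    rw [ih]
    simp

-- recursive characterisation of prefixSums' fold
def preFrom (s : Int) : List Int → List Int
  | [] => []
  | v :: t => (s + v) :: preFrom (s + v) t

theorem foldPre_eq (l : List Int) : ∀ (s : Int) (out : List Int),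
    (l.foldl (fun (st : Int × List Int) v => (st.1 + v, st.2 ++ [st.1 + v])) (s, out)).2
      = out ++ preFrom s l := by
  induction l with
  | nil => intro s out; simp [preFrom]
  | cons v t ih =>
    intro s out
    simp only [List.foldl, preFrom]
    rw [ih]
    simp

theorem zip_pre_eq_abs (l : List (Int × Int × Int)) : ∀ (px py : Int),
    (preFrom px (l.map (·.1))).zip ((preFrom py (l.map (·.2.1))).zip (l.map (·.2.2)))
      = absFrom px py l := by
  induction l with
  | nil => intro px py; simp [preFrom, absFrom]
  | cons o t ih =>
    intro px py
    simp only [List.map, preFrom, absFrom, List.zip_cons_cons]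
    rw [ih]

-- ===== VERDICT (by name: the statement is the Claim_ definition above) =====
theorem to_absolute_coordinates_spec : Claim_equal_to_absolute_coordinates := by
  intro offsets _
  unfold Spec_to_absolute_coordinates to_absolute_coordinates to_absolute_coordinates_alt
  cases offsets with
  | nil => simp
  | cons o t =>
    simp only [prefixSums]
    rw [foldA_eq, foldPre_eq, foldPre_eq]
    simp only [List.nil_append]
    rw [zip_pre_eq_abs]
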